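-- pv_equiv track=rewrite | github.com/jayscorpio/epic7 | v2.py | compare_score
-- ===== SOURCE A (Python) =====
-- def compare_score(score_0, score_1):
--     """Compare score
--     If at least one pair compare is worse and no is better or not worse or
--     unknown, regard as worse
--     If at least one pair compare is better and no is worse or not better or
--     unknown, regard as better
--     Args:
--         score_0 (list): compared score
--         score_1 (list): comparing score
--
--     Returns:
--         str: 'better'/'worse'/'same'/'unknown'
--     """
--     flg_same = True
--     idx = 0
--     # Loop into all criteria scores
--     for scs in score_0:
--         flg_better = False
--         flg_worse = False
--         flg_not_better = False
--         flg_not_worse = False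
--         flg_unknown = False
--         idx_2 = 0
--         for sc in scs:
--             result = compare_min_max(sc, score_1[idx][idx_2])
--             if result != 'same':
--                 flg_same = False
--                 if result == 'better':
--                     flg_better = True
--                 elif result == 'worse':
--                     flg_worse = True
--                 elif result == 'not better':
--                     flg_not_better = True
--                 elif result == 'not worse':
--                     flg_not_worse = True
--                 elif result == 'unknown':
--                     flg_unknown = True
--             idx_2 += 1
--         # Better?
--         if flg_better and not (flg_worse or flg_not_better or flg_unknown):
--             return 'better'
--         # Worse?
--         if flg_worse and not (flg_better or flg_not_worse or flg_unknown):
--             return 'worse'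
--         # Same?
--         if flg_same:
--             # Loop to next group
--             idx += 1
--         # Unknown? Regard as unknown and exit
--         break
--     # No difference found
--     if flg_same:
--         return 'same'
--     # Otherwise unknown
--     return 'unknown'
--
-- def compare_min_max(pair_0, pair_1):
--     """Compare min max value pairs
--
--     Args:
--         pair_0 (list): min max value pairs comparing
--         pair_1 (list): min max value pairs compared
--
--     Returns:
--         str: better/worse/not better/not worse/unknown
--     """
--     # Min value better
--     if pair_0[0] > pair_1[0]:
--         # Max value better
--         if pair_0[1] > pair_1[1]:
--             return 'better'
--         # Max value same
--         elif pair_0[1] == pair_1[1]: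
--             return 'not worse'
--         # Max value worse
--         else:
--             return 'unknown'
--     # Min value same
--     elif pair_0[0] == pair_1[0]:
--         # Max value better
--         if pair_0[1] > pair_1[1]:
--             return 'not worse'
--         # Max value same
--         elif pair_0[1] == pair_1[1]:
--             return 'same'
--         # Max value worse
--         else:
--             return 'not better'
--     # Min value worse
--     else:
--         # Max value better
--         if pair_0[1] > pair_1[1]:
--             return 'unknown'
--         # Max value same
--         elif pair_0[1] == pair_1[1]:
--             return 'not better'
--         # Max value worse
--         else:
--             return 'worse'
-- ===== SOURCE B (Python) =====
-- def compare_score(score_0, score_1):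
--     """Dominance test on (min, max) differences; only the first group is ever decisive."""
--     if not score_0:
--         return 'same'
--     diffs = [(p[0] - score_1[0][i][0], p[1] - score_1[0][i][1])
--              for i, p in enumerate(score_0[0])]
--     if all(dm >= 0 and dM >= 0 for dm, dM in diffs) and \
--        any(dm > 0 and dM > 0 for dm, dM in diffs):
--         return 'better'
--     if all(dm <= 0 and dM <= 0 for dm, dM in diffs) and \
--        any(dm < 0 and dM < 0 for dm, dM in diffs):
--         return 'worse'
--     if all(dm == 0 and dM == 0 for dm, dM in diffs):
--         return 'same'
--     return 'unknown'
-- ===== Notes on version B (the rewrite author's own statement) =====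
-- stated objective: simpler
-- what changed: B never computes compare_min_max's five-way category strings or A's flag bookkeeping at all: it computes the numeric (min,max) differences for the first group (the outer loop always breaks) and classifies by dominance tests - all diffs >=0 with one strictly positive pair gives 'better', symmetrically 'worse', all zero gives 'same', else 'unknown'.
import Mathlib
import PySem

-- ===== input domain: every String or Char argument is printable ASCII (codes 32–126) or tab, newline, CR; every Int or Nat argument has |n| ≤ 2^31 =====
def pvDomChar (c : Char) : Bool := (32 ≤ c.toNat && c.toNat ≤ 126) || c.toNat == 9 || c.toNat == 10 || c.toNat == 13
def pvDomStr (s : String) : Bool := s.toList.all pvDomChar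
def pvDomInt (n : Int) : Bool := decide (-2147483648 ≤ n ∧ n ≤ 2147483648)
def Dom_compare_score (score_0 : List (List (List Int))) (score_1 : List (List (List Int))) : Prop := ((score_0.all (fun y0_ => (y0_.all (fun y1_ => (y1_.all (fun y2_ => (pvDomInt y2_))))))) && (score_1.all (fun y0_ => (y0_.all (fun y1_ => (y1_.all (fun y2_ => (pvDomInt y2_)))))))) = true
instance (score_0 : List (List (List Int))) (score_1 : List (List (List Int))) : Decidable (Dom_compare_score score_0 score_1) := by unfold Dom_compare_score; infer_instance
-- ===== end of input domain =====

-- B drops compare_min_max's five-way category strings and A's flag bookkeeping entirely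
-- and classifies the first group by dominance tests on the numeric differences; objective: simpler.

-- ===== PORT A =====
-- compare_min_max: nested if/elif chain, exactly A's branches (pyGet? = [0]/[1];
-- the "error" fallback is the none/IndexError case, excluded by Pre_).
def pvCmpMinMaxA (pair_0 : List Int) (pair_1 : List Int) : String :=
  match PySem.List.pyGet? pair_0 0, PySem.List.pyGet? pair_1 0,
        PySem.List.pyGet? pair_0 1, PySem.List.pyGet? pair_1 1 with
  | some a0, some b0, some a1, some b1 =>
    if a0 > b0 then
      if a1 > b1 then "better" else if a1 = b1 then "not worse" else "unknown"
    else if a0 = b0 then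
      if a1 > b1 then "not worse" else if a1 = b1 then "same" else "not better"
    else
      if a1 > b1 then "unknown" else if a1 = b1 then "not better" else "worse"
  | _, _, _, _ => "error"

-- the inner for-loop of A: state = (flg_same, flg_better, flg_worse, flg_not_better,
-- flg_not_worse, flg_unknown, idx_2)
def pvStepA (score_1 : List (List (List Int)))
    (st : (Bool × Bool × Bool × Bool × Bool × Bool) × Int) (sc : List Int) :
    (Bool × Bool × Bool × Bool × Bool × Bool) × Int :=
  let result := pvCmpMinMaxA sc
    (((PySem.List.pyGet? score_1 0).bind (fun r => PySem.List.pyGet? r st.2)).getD [])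
  let (sm, b, w, nb, nw, un) := st.1
  let fl :=
    if result ≠ "same" then
      if result = "better" then (false, true, w, nb, nw, un)
      else if result = "worse" then (false, b, true, nb, nw, un)
      else if result = "not better" then (false, b, w, true, nw, un)
      else if result = "not worse" then (false, b, w, nb, true, un)
      else if result = "unknown" then (false, b, w, nb, nw, true)
      else (false, b, w, nb, nw, un)
    else (sm, b, w, nb, nw, un)
  (fl, st.2 + 1)

def compare_score (score_0 : List (List (List Int))) (score_1 : List (List (List Int))) : String :=
  match score_0 with
  | [] => "same"  -- loop body never runs; flg_same stays True
  | scs :: _ =>   -- the outer loop always breaks after its first iteration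
    let st := scs.foldl (pvStepA score_1) ((true, false, false, false, false, false), 0)
    let (sm, b, w, nb, nw, un) := st.1
    if b && !(w || nb || un) then "better"
    else if w && !(b || nw || un) then "worse"
    else if sm then "same"
    else "unknown"

-- ===== PORT B =====
-- one difference pair (p[0] - score_1[0][i][0], p[1] - score_1[0][i][1]);
-- the getD arms are the IndexError cases, excluded by Pre_.
def pvDiff (score_1 : List (List (List Int))) (p : Int × List Int) : Int × Int :=
  let q := ((PySem.List.pyGet? score_1 0).bind (fun r => PySem.List.pyGet? r p.1)).getD []
  ((PySem.List.pyGet? p.2 0).getD 0 - (PySem.List.pyGet? q 0).getD 0,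
   (PySem.List.pyGet? p.2 1).getD 0 - (PySem.List.pyGet? q 1).getD 0)

def compare_score_alt (score_0 : List (List (List Int))) (score_1 : List (List (List Int))) : String :=
  match score_0 with
  | [] => "same"
  | g :: _ =>
    let diffs := (PySem.List.enumerate g).map (pvDiff score_1)
    if diffs.all (fun d => 0 ≤ d.1 && 0 ≤ d.2) && diffs.any (fun d => 0 < d.1 && 0 < d.2) then "better"
    else if diffs.all (fun d => d.1 ≤ 0 && d.2 ≤ 0) && diffs.any (fun d => d.1 < 0 && d.2 < 0) then "worse"
    else if diffs.all (fun d => d.1 == 0 && d.2 == 0) then "same"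
    else "unknown"

-- ===== PRECONDITION & SPEC =====
-- A raises IndexError when the first score group is non-empty and score_1 has no
-- group, the first group of score_1 is shorter, or some compared pair has < 2 entries.
def Pre_compare_score (score_0 : List (List (List Int))) (score_1 : List (List (List Int))) : Prop :=
  score_0 = [] ∨ score_0.headI = [] ∨
    (score_1 ≠ [] ∧ score_0.headI.length ≤ score_1.headI.length ∧
      (∀ p ∈ score_0.headI, 2 ≤ p.length) ∧
      (∀ p ∈ score_1.headI.take score_0.headI.length, 2 ≤ p.length))
instance (score_0 : List (List (List Int))) (score_1 : List (List (List Int))) : Decidable (Pre_compare_score score_0 score_1) := by unfold Pre_compare_score; infer_instance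

def pvWitness_compare_score : List (List (List Int)) × List (List (List Int)) :=
  ([[[1, 5], [0, 2]]], [[[0, 4], [0, 2]]])

def Spec_compare_score (score_0 : List (List (List Int))) (score_1 : List (List (List Int))) (out : String) : Prop := out = compare_score_alt score_0 score_1
instance (score_0 : List (List (List Int))) (score_1 : List (List (List Int))) (out : String) : Decidable (Spec_compare_score score_0 score_1 out) := by unfold Spec_compare_score; infer_instance

-- ===== CLAIM (what is proved, stated in full; the proofs are below) =====
def Claim_equal_compare_score : Prop := ∀ (score_0 : List (List (List Int))) (score_1 : List (List (List Int))), Dom_compare_score score_0 score_1 → Pre_compare_score score_0 score_1 → Spec_compare_score score_0 score_1 (compare_score score_0 score_1)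

-- ===== LEMMAS AND PROOFS =====

-- proof-only: compare_min_max's result string as a function of the difference pair
def pvClassify (d : Int × Int) : String :=
  if 0 < d.1 then
    if 0 < d.2 then "better" else if d.2 = 0 then "not worse" else "unknown"
  else if d.1 = 0 then
    if 0 < d.2 then "not worse" else if d.2 = 0 then "same" else "not better"
  else
    if 0 < d.2 then "unknown" else if d.2 = 0 then "not better" else "worse"

theorem cl_better (d : Int × Int) : pvClassify d = "better" ↔ 0 < d.1 ∧ 0 < d.2 := by
  obtain ⟨x, y⟩ := d; unfold pvClassify; split_ifs <;> simp_all
theorem cl_worse (d : Int × Int) : pvClassify d = "worse" ↔ d.1 < 0 ∧ d.2 < 0 := by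
  obtain ⟨x, y⟩ := d; unfold pvClassify; split_ifs <;> simp_all <;> omega
theorem cl_same (d : Int × Int) : pvClassify d = "same" ↔ d.1 = 0 ∧ d.2 = 0 := by
  obtain ⟨x, y⟩ := d; unfold pvClassify; split_ifs <;> simp_all <;> omega
theorem cl_nonneg (d : Int × Int) :
    (pvClassify d ≠ "worse" ∧ pvClassify d ≠ "not better" ∧ pvClassify d ≠ "unknown") ↔
      0 ≤ d.1 ∧ 0 ≤ d.2 := by
  obtain ⟨x, y⟩ := d; unfold pvClassify; split_ifs <;> simp_all <;> omega
theorem cl_nonpos (d : Int × Int) :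
    (pvClassify d ≠ "better" ∧ pvClassify d ≠ "not worse" ∧ pvClassify d ≠ "unknown") ↔
      d.1 ≤ 0 ∧ d.2 ≤ 0 := by
  obtain ⟨x, y⟩ := d; unfold pvClassify; split_ifs <;> simp_all <;> omega

-- xs[1] on a two-cons list
theorem pyGet_one (a b : Int) (t : List Int) :
    PySem.List.pyGet? (a :: b :: t) (1 : Int) = some b := by
  have h := PySem.List.pyGet?_ofNat (xs := a :: b :: t) (n := 1) (by simp)
  simpa using h

-- pointwise: compare_min_max on pairs of length ≥ 2 is pvClassify of the differences
theorem cmp_classify (a0 a1 b0 b1 : Int) (ta tb : List Int) :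
    pvCmpMinMaxA (a0 :: a1 :: ta) (b0 :: b1 :: tb) = pvClassify (a0 - b0, a1 - b1) := by
  simp only [pvCmpMinMaxA, PySem.List.pyGet?_zero_cons, pyGet_one]
  unfold pvClassify
  simp only [gt_iff_lt]
  split_ifs <;> first | rfl | omega

-- A's results list starting at index k
def pvRes (score_1 : List (List (List Int))) : Int → List (List Int) → List String
  | _, [] => []
  | k, sc :: t => pvCmpMinMaxA sc
      ((((PySem.List.pyGet? score_1 0).bind (fun r => PySem.List.pyGet? r k)).getD []))
      :: pvRes score_1 (k + 1) t

theorem fold_spec (s1 : List (List (List Int))) :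
    ∀ (scs : List (List Int)) (k : Int) (sm b w nb nw un : Bool),
      scs.foldl (pvStepA s1) ((sm, b, w, nb, nw, un), k) =
        ((sm && (pvRes s1 k scs).all (· == "same"),
          b || (pvRes s1 k scs).contains "better",
          w || (pvRes s1 k scs).contains "worse",
          nb || (pvRes s1 k scs).contains "not better",
          nw || (pvRes s1 k scs).contains "not worse",
          un || (pvRes s1 k scs).contains "unknown"), k + scs.length) := by
  intro scs
  induction scs with
  | nil => intro k sm b w nb nw un; simp [pvRes]
  | cons sc t ih =>
    intro k sm b w nb nw un
    simp only [List.foldl_cons]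
    have hstep : pvStepA s1 ((sm, b, w, nb, nw, un), k) sc =
        (let r := pvCmpMinMaxA sc
          (((PySem.List.pyGet? s1 0).bind (fun l => PySem.List.pyGet? l k)).getD [])
         ((sm && (r == "same"), b || ("better" == r), w || ("worse" == r),
           nb || ("not better" == r), nw || ("not worse" == r),
           un || ("unknown" == r)), k + 1)) := by
      unfold pvStepA
      set r := pvCmpMinMaxA sc (((PySem.List.pyGet? s1 0).bind
        (fun l => PySem.List.pyGet? l k)).getD []) with hr
      by_cases h1 : r = "same"
      · simp [h1]
      · by_cases h2 : r = "better"
        · simp [h2]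
        · by_cases h3 : r = "worse"
          · simp [h3, Ne.symm h2]
          · by_cases h4 : r = "not better"
            · simp [h4, Ne.symm h2, Ne.symm h3]
            · by_cases h5 : r = "not worse"
              · simp [h5, Ne.symm h2, Ne.symm h3, Ne.symm h4]
              · by_cases h6 : r = "unknown"
                · simp [h6, Ne.symm h2, Ne.symm h3, Ne.symm h4, Ne.symm h5]
                · simp [h1, h2, h3, h4, h5, h6, Ne.symm h2, Ne.symm h3, Ne.symm h4,
                    Ne.symm h5, Ne.symm h6]
    rw [hstep, ih]
    simp only [pvRes, List.contains_cons, List.all_cons, Bool.or_assoc, Bool.and_assoc,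
      Prod.mk.injEq]
    and_intros <;> (try rfl) <;> simp only [List.length_cons] <;> push_cast <;> ring

theorem two_le_shape (l : List Int) (h : 2 ≤ l.length) : ∃ x y t, l = x :: y :: t := by
  rcases l with _ | ⟨x, _ | ⟨y, t⟩⟩
  · simp at h
  · simp at h
  · exact ⟨x, y, t, rfl⟩

-- under Pre_'s length conditions, A's results are pvClassify of B's diffs
theorem res_eq (h1 : List (List Int)) (rest : List (List (List Int))) :
    ∀ (g : List (List Int)) (k : Nat),
      (∀ sc ∈ g, 2 ≤ sc.length) → k + g.length ≤ h1.length →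
      (∀ i, k ≤ i → i < k + g.length → 2 ≤ (h1.getD i []).length) →
      pvRes (h1 :: rest) (k : Int) g =
        ((PySem.List.enumerate g (k : Int)).map (pvDiff (h1 :: rest))).map pvClassify := by
  intro g
  induction g with
  | nil => intro k _ _ _; simp [pvRes, PySem.List.enumerate_nil]
  | cons sc t ih =>
    intro k hlen hle hin
    have hk : k < h1.length := by simp at hle; omega
    have hq2 : 2 ≤ (h1[k]).length := by
      have h := hin k le_rfl (by simp)
      rwa [List.getD_eq_getElem?_getD, List.getElem?_eq_getElem hk, Option.getD_some] at h
    obtain ⟨x, y, tx, hsc⟩ := two_le_shape sc (hlen sc (by simp))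
    obtain ⟨u, v, tu, hu⟩ := two_le_shape h1[k] hq2
    have hpart : PySem.List.pyGet? h1 (k : Int) = some (u :: v :: tu) := by
      rw [PySem.List.pyGet?_natCast, List.getElem?_eq_getElem hk, hu]
    have hdiff : pvDiff (h1 :: rest) ((k : Int), x :: y :: tx) = (x - u, y - v) := by
      simp only [pvDiff, PySem.List.pyGet?_zero_cons, Option.bind_some, hpart,
        Option.getD_some, pyGet_one]
    have htail : pvRes (h1 :: rest) ((k : Int) + 1) t =
        ((PySem.List.enumerate t ((k : Int) + 1)).map (pvDiff (h1 :: rest))).map pvClassify := by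
      have h := ih (k + 1) (fun sc h => hlen sc (by simp [h]))
        (by simp at hle ⊢; omega)
        (fun i h1i h2i => hin i (by omega) (by simp at h2i ⊢; omega))
      simpa [Nat.cast_add] using h
    rw [PySem.List.enumerate_cons]
    simp only [pvRes, List.map_cons, PySem.List.pyGet?_zero_cons, Option.bind_some, hpart,
      Option.getD_some, hdiff, hsc, htail, cmp_classify]

-- Bool bridges: A's flag tests over the classified results = B's dominance tests over the diffs
theorem cond_better (ds : List (Int × Int)) :
    ((ds.map pvClassify).contains "better" &&
      !((ds.map pvClassify).contains "worse" || (ds.map pvClassify).contains "not better" ||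
        (ds.map pvClassify).contains "unknown")) =
    (ds.all (fun d => 0 ≤ d.1 && 0 ≤ d.2) && ds.any (fun d => 0 < d.1 && 0 < d.2)) := by
  rw [Bool.eq_iff_iff]
  simp [List.all_eq_true, List.any_eq_true]
  constructor
  · rintro ⟨⟨a, b, hab, hcl⟩, ⟨hw, hnb⟩, hu⟩
    exact ⟨fun p q hpq => (cl_nonneg (p, q)).1 ⟨hw p q hpq, hnb p q hpq, hu p q hpq⟩,
      a, b, hab, (cl_better (a, b)).1 hcl⟩
  · rintro ⟨hall, a, b, hab, h1, h2⟩
    exact ⟨⟨a, b, hab, (cl_better (a, b)).2 ⟨h1, h2⟩⟩,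
      ⟨fun p q hpq => ((cl_nonneg (p, q)).2 (hall p q hpq)).1,
       fun p q hpq => ((cl_nonneg (p, q)).2 (hall p q hpq)).2.1⟩,
      fun p q hpq => ((cl_nonneg (p, q)).2 (hall p q hpq)).2.2⟩

theorem cond_worse (ds : List (Int × Int)) :
    ((ds.map pvClassify).contains "worse" &&
      !((ds.map pvClassify).contains "better" || (ds.map pvClassify).contains "not worse" ||
        (ds.map pvClassify).contains "unknown")) =
    (ds.all (fun d => d.1 ≤ 0 && d.2 ≤ 0) && ds.any (fun d => d.1 < 0 && d.2 < 0)) := by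
  rw [Bool.eq_iff_iff]
  simp [List.all_eq_true, List.any_eq_true]
  constructor
  · rintro ⟨⟨a, b, hab, hcl⟩, ⟨hb, hnw⟩, hu⟩
    exact ⟨fun p q hpq => (cl_nonpos (p, q)).1 ⟨hb p q hpq, hnw p q hpq, hu p q hpq⟩,
      a, b, hab, (cl_worse (a, b)).1 hcl⟩
  · rintro ⟨hall, a, b, hab, h1, h2⟩
    exact ⟨⟨a, b, hab, (cl_worse (a, b)).2 ⟨h1, h2⟩⟩,
      ⟨fun p q hpq => ((cl_nonpos (p, q)).2 (hall p q hpq)).1,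
       fun p q hpq => ((cl_nonpos (p, q)).2 (hall p q hpq)).2.1⟩,
      fun p q hpq => ((cl_nonpos (p, q)).2 (hall p q hpq)).2.2⟩

theorem cond_same (ds : List (Int × Int)) :
    (ds.map pvClassify).all (· == "same") = ds.all (fun d => d.1 == 0 && d.2 == 0) := by
  rw [Bool.eq_iff_iff]
  simp [List.all_eq_true]
  constructor <;> intro h a b hab
  · exact (cl_same (a, b)).1 (h a b hab)
  · exact (cl_same (a, b)).2 (h a b hab)

theorem cs_eq_of_pre (score_0 : List (List (List Int))) (score_1 : List (List (List Int)))
    (hp : Pre_compare_score score_0 score_1) :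
    compare_score score_0 score_1 = compare_score_alt score_0 score_1 := by
  match score_0 with
  | [] => rfl
  | g :: r0 =>
    rcases hp with h | h | ⟨h1ne, hlen, hg, htake⟩
    · exact absurd h (by simp)
    · simp only [List.headI] at h
      subst h
      rfl
    · match score_1, h1ne with
      | h1 :: rest, _ =>
        simp only [List.headI] at hlen hg htake
        have hres : pvRes (h1 :: rest) ((0 : Nat) : Int) g =
            ((PySem.List.enumerate g ((0 : Nat) : Int)).map (pvDiff (h1 :: rest))).map pvClassify := by
          refine res_eq h1 rest g 0 hg (by omega) ?_
          intro i _ hi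
          have hb : i < (h1.take g.length).length := by
            simp only [List.length_take]; omega
          have him : h1[i] ∈ h1.take g.length := by
            have e : (h1.take g.length)[i]'hb = h1[i] := List.getElem_take
            rw [← e]; exact List.getElem_mem hb
          have h := htake h1[i] him
          rwa [List.getD_eq_getElem?_getD, List.getElem?_eq_getElem (by omega), Option.getD_some]
        simp only [compare_score, compare_score_alt]
        rw [fold_spec]
        simp only [Nat.cast_zero] at hres
        rw [hres]
        simp only [Bool.true_and, Bool.false_or, cond_better, cond_worse, cond_same]

-- ===== VERDICT (by name: the statement is the Claim_ definition above) =====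
theorem compare_score_spec : Claim_equal_compare_score := by
  intro score_0 score_1 _ hp
  unfold Spec_compare_score
  exact cs_eq_of_pre score_0 score_1 hp
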